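-- pv_equiv track=rewrite | github.com/Foundup/Foundups-Agent | holo_index/output_composer.py | _extract_general_summary
-- ===== SOURCE A (Python) =====
-- def _extract_general_summary(findings: str) -> str:
--     """Extract general summary, keep first N lines of each category"""
--     lines = findings.split('\n')
--     summary_lines = []
--
--     # Keep section headers and first few entries
--     current_section = None
--     section_count = 0
--
--     for line in lines:
--         # Detect section headers
--         if line.startswith('[') and ']' in line:
--             current_section = line
--             summary_lines.append(line)
--             section_count = 0
--         elif current_section and section_count < 3:
--             # Keep first 3 items per section
--             summary_lines.append(line)
--             section_count += 1
--
--     return "\n".join(summary_lines) if summary_lines else findings[:1000]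
-- ===== SOURCE B (Python) =====
-- def _extract_general_summary(findings: str) -> str:
--     """Group lines into (header, items) sections, then emit each header with its first 3 items."""
--     sections = []
--     for line in findings.split('\n'):
--         if line.startswith('[') and ']' in line:
--             sections.append((line, []))
--         elif sections:
--             sections[-1][1].append(line)
--     if not sections:
--         return findings[:1000]
--     out = []
--     for header, items in sections:
--         out.append(header)
--         out.extend(items[:3])
--     return "\n".join(out)
-- ===== Notes on version B (the rewrite author's own statement) =====
-- stated objective: alternative
-- what changed: Replaces A's inline current_section/section_count state machine with a two-pass decomposition: first group the lines into explicit (header, items) sections, then render each header followed by items[:3].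
import Mathlib
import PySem

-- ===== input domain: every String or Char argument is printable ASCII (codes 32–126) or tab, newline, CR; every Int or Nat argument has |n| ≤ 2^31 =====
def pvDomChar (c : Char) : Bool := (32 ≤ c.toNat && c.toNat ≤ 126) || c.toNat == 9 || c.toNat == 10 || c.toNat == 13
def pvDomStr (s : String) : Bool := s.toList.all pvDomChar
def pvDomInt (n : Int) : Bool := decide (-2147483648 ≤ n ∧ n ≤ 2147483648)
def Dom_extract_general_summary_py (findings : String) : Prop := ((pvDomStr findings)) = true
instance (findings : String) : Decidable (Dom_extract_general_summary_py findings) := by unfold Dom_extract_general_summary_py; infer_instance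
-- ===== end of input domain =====

-- B replaces A's inline current_section/section_count state machine with a two-pass
-- decomposition: group lines into explicit (header, items) sections, then render each
-- header followed by its first 3 items (objective: alternative; same cost).


-- ===== PORT A =====
-- the loop over `lines` with state (summary_lines, current_section, section_count);
-- Python's `if current_section` is truthiness of the stored header string — headers
-- always start with '[' hence are non-empty, so it is exactly `cur.isSome`.
def goA : List String → List String → Option String → Nat → List String
  | [], acc, _, _ => acc
  | l :: rest, acc, cur, cnt =>
    if PySem.Str.startswith l "[" && PySem.Str.isIn "]" l then
      goA rest (acc ++ [l]) (some l) 0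
    else if cur.isSome && decide (cnt < 3) then
      goA rest (acc ++ [l]) cur (cnt + 1)
    else
      goA rest acc cur cnt

def extract_general_summary_py (findings : String) : String :=
  let lines := (PySem.Str.split? findings "\n").getD []
  let summary_lines := goA lines [] none 0
  if summary_lines ≠ [] then PySem.Str.join "\n" summary_lines
  else PySem.Str.slice findings none (some 1000)

-- ===== PORT B =====
def isHeaderB (l : String) : Bool := PySem.Str.startswith l "[" && PySem.Str.isIn "]" l

-- sections[-1][1].append(line)
def appendLastB : List (String × List String) → String → List (String × List String)
  | [], _ => []
  | [(h, its)], l => [(h, its ++ [l])]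
  | p :: q :: rest, l => p :: appendLastB (q :: rest) l

-- first pass: group the lines into (header, items) sections
def goB : List String → List (String × List String) → List (String × List String)
  | [], secs => secs
  | l :: rest, secs =>
    if isHeaderB l then goB rest (secs ++ [(l, [])])
    else if secs.isEmpty then goB rest secs
    else goB rest (appendLastB secs l)

-- second pass: each header followed by its items[:3]
def renderB (secs : List (String × List String)) : List String :=
  secs.flatMap (fun p => p.1 :: p.2.take 3)

def extract_general_summary_py_alt (findings : String) : String :=
  let secs := goB ((PySem.Str.split? findings "\n").getD []) []
  if secs.isEmpty then PySem.Str.slice findings none (some 1000)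
  else PySem.Str.join "\n" (renderB secs)

-- ===== PRECONDITION & SPEC =====
def Spec_extract_general_summary_py (findings : String) (out : String) : Prop := out = extract_general_summary_py_alt findings
instance (findings : String) (out : String) : Decidable (Spec_extract_general_summary_py findings out) := by unfold Spec_extract_general_summary_py; infer_instance

-- ===== CLAIM (what is proved, stated in full; the proofs are below) =====
def Claim_equal_extract_general_summary_py : Prop := ∀ (findings : String), Dom_extract_general_summary_py findings → Spec_extract_general_summary_py findings (extract_general_summary_py findings)

-- ===== LEMMAS AND PROOFS =====

-- items of the last section (used to tie A's section_count to B's grouped state)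
def lastItems (S : List (String × List String)) : List String :=
  ((S.getLast?).map Prod.snd).getD []

theorem renderB_append_header (S : List (String × List String)) (l : String) :
    renderB (S ++ [(l, [])]) = renderB S ++ [l] := by
  simp [renderB]

theorem appendLastB_concat (T : List (String × List String)) (h : String)
    (its : List String) (l : String) :
    appendLastB (T ++ [(h, its)]) l = T ++ [(h, its ++ [l])] := by
  induction T with
  | nil => simp [appendLastB]
  | cons p T ih =>
    cases T with
    | nil => simp [appendLastB]
    | cons q T' => simpa [appendLastB] using ih

theorem lastItems_concat (T : List (String × List String)) (h : String) (its : List String) :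
    lastItems (T ++ [(h, its)]) = its := by
  simp [lastItems]

theorem goA_eq_goB (lines : List String) :
    ∀ (S : List (String × List String)) (cur : Option String) (cnt : Nat),
      cur.isSome = !S.isEmpty →
      (S ≠ [] → cnt = min (lastItems S).length 3) →
      goA lines (renderB S) cur cnt = renderB (goB lines S) := by
  induction lines with
  | nil => intro S cur cnt _ _; simp [goA, goB]
  | cons l rest ih =>
    intro S cur cnt hcur hcnt
    cases hl : (PySem.Str.startswith l "[" && PySem.Str.isIn "]" l) with
    | true =>
      -- header line: both append a fresh section / the header
      rw [goA, goB]
      simp only [isHeaderB, hl, if_true]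
      rw [← renderB_append_header]
      exact ih (S ++ [(l, [])]) (some l) 0 (by simp) (by intro _; simp [lastItems_concat])
    | false =>
      rcases List.eq_nil_or_concat S with hS | ⟨T, p, rfl⟩
      · -- no current section: both drop the line
        subst hS
        have hcur' : cur = none := by
          cases cur with
          | none => rfl
          | some _ => simp at hcur
        subst hcur'
        rw [goA, goB]
        simp only [isHeaderB, hl, Bool.false_eq_true, if_false, Option.isSome_none,
          Bool.false_and, List.isEmpty_nil, if_true]
        exact ih [] none cnt (by simp) (by intro hc; exact absurd rfl hc)
      · -- inside a section
        obtain ⟨h, its⟩ := p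
        rw [List.concat_eq_append] at hcur hcnt ⊢
        have hne2 : ((T ++ [(h, its)]) : List (String × List String)).isEmpty = false := by
          cases T <;> rfl
        have hcur' : cur.isSome = true := by rw [hne2] at hcur; simpa using hcur
        have hcnt' : cnt = min its.length 3 := by
          simpa [lastItems_concat] using hcnt (by simp)
        rw [goA, goB]
        simp only [isHeaderB, hl, Bool.false_eq_true, if_false, hcur', Bool.true_and]
        rw [if_neg (by simp : ¬ ((T ++ [(h, its)]) : List (String × List String)).isEmpty = true)]
        rw [appendLastB_concat]
        by_cases hlen : its.length < 3
        · -- fewer than 3 items so far: A appends the line, B appends to the last section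
          have hcl : cnt < 3 := by omega
          rw [if_pos (by simpa using hcl)]
          have hrender : renderB (T ++ [(h, its)]) ++ [l] = renderB (T ++ [(h, its ++ [l])]) := by
            simp [renderB, List.take_of_length_le (by omega : its.length ≤ 3),
              List.take_of_length_le (by simp; omega : (its ++ [l]).length ≤ 3)]
          rw [hrender]
          exact ih (T ++ [(h, its ++ [l])]) cur (cnt + 1)
            (by rw [show ((T ++ [(h, its ++ [l])]) : List (String × List String)).isEmpty = false from by cases T <;> rfl]; simpa using hcur')
            (by intro _; simp [lastItems_concat]; omega)
        · -- already 3 items: A skips the line, the appended item is cut by take 3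
          have hcl : ¬ cnt < 3 := by omega
          rw [if_neg (by simpa using hcl)]
          have hrender : renderB (T ++ [(h, its)]) = renderB (T ++ [(h, its ++ [l])]) := by
            simp [renderB, List.take_append_of_le_length (by omega : 3 ≤ its.length)]
          rw [hrender]
          exact ih (T ++ [(h, its ++ [l])]) cur cnt
            (by rw [show ((T ++ [(h, its ++ [l])]) : List (String × List String)).isEmpty = false from by cases T <;> rfl]; simpa using hcur')
            (by intro _; simp [lastItems_concat]; omega)

-- ===== VERDICT (by name: the statement is the Claim_ definition above) =====
theorem extract_general_summary_py_spec : Claim_equal_extract_general_summary_py := by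
  intro findings _
  unfold Spec_extract_general_summary_py extract_general_summary_py extract_general_summary_py_alt
  show (if goA ((PySem.Str.split? findings "\n").getD []) [] none 0 ≠ [] then
          PySem.Str.join "\n" (goA ((PySem.Str.split? findings "\n").getD []) [] none 0)
        else PySem.Str.slice findings none (some 1000)) =
       (if (goB ((PySem.Str.split? findings "\n").getD []) []).isEmpty = true then
          PySem.Str.slice findings none (some 1000)
        else PySem.Str.join "\n" (renderB (goB ((PySem.Str.split? findings "\n").getD []) [])))
  have hmain := goA_eq_goB ((PySem.Str.split? findings "\n").getD []) [] none 0
    (by simp) (by intro hc; exact absurd rfl hc)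
  simp only [renderB] at hmain
  simp only [List.flatMap_nil] at hmain
  rw [hmain]
  rcases h : goB ((PySem.Str.split? findings "\n").getD []) [] with _ | ⟨p, S'⟩
  · simp
  · simp [renderB]
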